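-- pv_equiv track=rewrite | github.com/Edunametu/Programacion2.0 | eje1.py | palabra_no_tiene_letras
-- ===== SOURCE A (Python) =====
-- def palabra_no_tiene_letras(palabra,letras_probidas):
--     condicion=0
--     for letra in palabra:
--        for letras2 in letras_probidas:
--         if letra==letras2:
--            condicion+=1
--     if condicion!=0:
--         return False
--     else:
--         return True
-- ===== SOURCE B (Python) =====
-- def palabra_no_tiene_letras(palabra, letras_probidas):
--     return not (set(palabra) & set(letras_probidas))
-- ===== Notes on version B (the rewrite author's own statement) =====
-- stated objective: faster
-- what changed: Replaced A's nested per-character counting loops with building two sets and testing their intersection for emptiness; no explicit loop or counter remains.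
import Mathlib
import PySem

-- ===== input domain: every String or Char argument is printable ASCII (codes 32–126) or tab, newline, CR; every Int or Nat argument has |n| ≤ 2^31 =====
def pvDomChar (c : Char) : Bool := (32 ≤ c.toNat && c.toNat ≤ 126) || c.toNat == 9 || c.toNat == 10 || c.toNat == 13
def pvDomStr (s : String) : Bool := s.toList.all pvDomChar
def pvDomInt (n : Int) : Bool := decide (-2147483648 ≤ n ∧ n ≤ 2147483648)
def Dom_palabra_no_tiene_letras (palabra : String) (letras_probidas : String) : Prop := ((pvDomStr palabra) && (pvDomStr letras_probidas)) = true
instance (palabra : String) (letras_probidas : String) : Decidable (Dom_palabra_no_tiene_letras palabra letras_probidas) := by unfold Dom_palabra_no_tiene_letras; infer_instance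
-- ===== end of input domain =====

-- B replaces A's nested counting loops by set intersection emptiness; objective: simpler.


-- ===== PORT A =====
def palabra_no_tiene_letras (palabra : String) (letras_probidas : String) : Bool :=
  let condicion : Int :=
    palabra.toList.foldl (fun c letra =>
      letras_probidas.toList.foldl (fun c letras2 =>
        if letra == letras2 then c + 1 else c) c) 0
  if condicion ≠ 0 then false else true

-- ===== PORT B =====
def palabra_no_tiene_letras_alt (palabra : String) (letras_probidas : String) : Bool :=
  (PySem.Set.inter (PySem.Set.ofList palabra.toList)
      (PySem.Set.ofList letras_probidas.toList)).isEmpty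

-- ===== PRECONDITION & SPEC =====
def Spec_palabra_no_tiene_letras (palabra : String) (letras_probidas : String) (out : Bool) : Prop := out = palabra_no_tiene_letras_alt palabra letras_probidas
instance (palabra : String) (letras_probidas : String) (out : Bool) : Decidable (Spec_palabra_no_tiene_letras palabra letras_probidas out) := by unfold Spec_palabra_no_tiene_letras; infer_instance

-- ===== CLAIM (what is proved, stated in full; the proofs are below) =====
def Claim_equal_palabra_no_tiene_letras : Prop := ∀ (palabra : String) (letras_probidas : String), Dom_palabra_no_tiene_letras palabra letras_probidas → Spec_palabra_no_tiene_letras palabra letras_probidas (palabra_no_tiene_letras palabra letras_probidas)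

-- ===== LEMMAS AND PROOFS =====

-- inner loop adds the number of matches
theorem pv_inner (a : Char) (ls : List Char) (c : Int) :
    ls.foldl (fun c l2 => if a == l2 then c + 1 else c) c = c + (ls.count a : Int) := by
  induction ls generalizing c with
  | nil => simp
  | cons h t ih =>
      rw [List.foldl_cons, ih, List.count_cons]
      by_cases hx : a = h
      · simp [hx]; ring
      · have hba : (h == a) = false := beq_eq_false_iff_ne.mpr (fun e => hx e.symm)
        simp [hx, hba]

-- outer loop: zero iff every char of the word misses all forbidden letters
theorem pv_outer (ls : List Char) (ps : List Char) (c : Int) (hc : 0 ≤ c) :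
    (ps.foldl (fun c letra =>
      ls.foldl (fun c l2 => if letra == l2 then c + 1 else c) c) c = 0)
    ↔ (c = 0 ∧ ∀ a ∈ ps, a ∉ ls) := by
  induction ps generalizing c with
  | nil => simp
  | cons h t ih =>
      rw [List.foldl_cons, pv_inner, ih _ (by positivity)]
      have hcount : (0:Int) ≤ (ls.count h : Int) := by positivity
      constructor
      · rintro ⟨h1, h2⟩
        have hc0 : c = 0 ∧ (ls.count h : Int) = 0 := by omega
        refine ⟨hc0.1, ?_⟩
        intro a ha
        rcases List.mem_cons.mp ha with rfl | ha
        · have : ls.count a = 0 := by exact_mod_cast hc0.2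
          exact (List.count_eq_zero.mp this)
        · exact h2 a ha
      · rintro ⟨rfl, h2⟩
        have : ls.count h = 0 := List.count_eq_zero.mpr (h2 h (by simp))
        refine ⟨by simp [this], fun a ha => h2 a (List.mem_cons_of_mem _ ha)⟩

theorem pv_alt_iff (palabra letras_probidas : String) :
    palabra_no_tiene_letras_alt palabra letras_probidas = true
    ↔ ∀ a ∈ palabra.toList, a ∉ letras_probidas.toList := by
  unfold palabra_no_tiene_letras_alt
  rw [List.isEmpty_iff, List.eq_nil_iff_forall_not_mem]
  constructor
  · intro h a ha hb
    exact h a (by rw [PySem.Set.mem_inter]; simp [PySem.Set.mem_ofList, ha, hb])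
  · intro h a ha
    rw [PySem.Set.mem_inter, PySem.Set.mem_ofList, PySem.Set.mem_ofList] at ha
    exact h a ha.1 ha.2

-- ===== VERDICT (by name: the statement is the Claim_ definition above) =====
theorem palabra_no_tiene_letras_spec : Claim_equal_palabra_no_tiene_letras := by
  intro palabra letras_probidas _
  unfold Spec_palabra_no_tiene_letras palabra_no_tiene_letras
  simp only
  by_cases hz : (palabra.toList.foldl (fun c letra =>
      letras_probidas.toList.foldl (fun c l2 => if letra == l2 then c + 1 else c) c) (0:Int)) = 0
  · have := (pv_outer letras_probidas.toList palabra.toList 0 le_rfl).mp hz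
    rw [if_neg (not_not_intro hz)]
    exact ((pv_alt_iff _ _).mpr this.2).symm
  · rw [if_pos (by simpa using hz)]
    by_contra hb
    have halt : palabra_no_tiene_letras_alt palabra letras_probidas = true := by
      cases h : palabra_no_tiene_letras_alt palabra letras_probidas
      · exact absurd h.symm hb
      · rfl
    have := (pv_alt_iff _ _).mp halt
    exact hz ((pv_outer letras_probidas.toList palabra.toList 0 le_rfl).mpr ⟨rfl, this⟩)
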